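-- pv_equiv track=rewrite | github.com/andrrrei/GraphicFingerprint | grfingerprint.py | symmetrize_field
-- ===== SOURCE A (Python) =====
-- from typing import List, Tuple
--
-- def symmetrize_field(field: List[List[int]], mode: str, merge: str = "sum"):
--
--     if mode == "none":
--         return field
--
--     h = len(field)
--     w = len(field[0]) if h else 0
--
--     def get(x, y):
--         return field[y][x]
--
--     out = [[0 for _ in range(w)] for _ in range(h)]
--
--     for y in range(h):
--         for x in range(w):
--             vals = [get(x, y)]
--             if mode in ("x", "xy"):
--                 vals.append(get(w - 1 - x, y))
--             if mode in ("y", "xy"):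
--                 vals.append(get(x, h - 1 - y))
--             if mode == "xy":
--                 vals.append(get(w - 1 - x, h - 1 - y))
--
--             out[y][x] = sum(vals) if merge == "sum" else max(vals)
--
--     return out
-- ===== SOURCE B (Python) =====
-- def symmetrize_field(field, mode, merge="sum"):
--     if mode == "none":
--         return field
--     h = len(field)
--     w = len(field[0]) if h else 0
--     variants = [[row[:w] for row in field]]
--     if mode in ("x", "xy"):
--         variants.append([[row[w - 1 - x] for x in range(w)] for row in field])
--     if mode in ("y", "xy"):
--         variants.append([field[h - 1 - y][:w] for y in range(h)])
--     if mode == "xy":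
--         variants.append([[field[h - 1 - y][w - 1 - x] for x in range(w)]
--                          for y in range(h)])
--     return [[sum(cells) if merge == "sum" else max(cells)
--              for cells in zip(*rows)]
--             for rows in zip(*variants)]
-- ===== Notes on version B (the rewrite author's own statement) =====
-- stated objective: alternative
-- what changed: B first materializes each mirrored variant of the whole field (original, x-mirror, y-mirror, xy-mirror) as separate 2D lists and then merges them cell-by-cell with zip, instead of A's per-cell gather of mirror values inside a nested index loop.
-- outside the precondition, e.g. on symmetrize_field([[1, 2], [3]], 'x', 'sum'): A raises IndexError, B raises IndexError
import Mathlib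
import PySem

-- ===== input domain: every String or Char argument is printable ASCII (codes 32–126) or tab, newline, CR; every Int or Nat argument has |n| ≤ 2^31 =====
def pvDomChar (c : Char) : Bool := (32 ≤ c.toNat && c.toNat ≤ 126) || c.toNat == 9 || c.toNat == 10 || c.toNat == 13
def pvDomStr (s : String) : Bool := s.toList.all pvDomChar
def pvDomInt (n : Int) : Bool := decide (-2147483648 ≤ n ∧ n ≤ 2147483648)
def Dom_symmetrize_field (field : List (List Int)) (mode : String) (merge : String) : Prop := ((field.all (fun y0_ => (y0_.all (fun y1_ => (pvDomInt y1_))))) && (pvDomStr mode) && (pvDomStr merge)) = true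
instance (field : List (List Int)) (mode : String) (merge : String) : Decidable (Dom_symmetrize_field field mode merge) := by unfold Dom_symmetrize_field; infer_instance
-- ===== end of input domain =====

-- B builds each mirrored variant of the whole field first and then merges the variants
-- cell-by-cell (zip), instead of A's per-cell gather inside a nested loop; objective: alternative decomposition.

-- ===== PORT A =====
-- per-cell gather: indexing is total (getD 0); Pre_ excludes inputs where Python's field[y][x] would raise
def symmetrize_field (field : List (List Int)) (mode : String) (merge : String) : List (List Int) :=
  if mode == "none" then field
  else
    let h := field.length
    let w := if h ≠ 0 then (field.headD []).length else 0
    let get := fun (x y : Nat) => (field.getD y []).getD x 0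
    (List.range h).map (fun y =>
      (List.range w).map (fun x =>
        let vals := [get x y]
        let vals := if mode == "x" || mode == "xy" then vals ++ [get (w - 1 - x) y] else vals
        let vals := if mode == "y" || mode == "xy" then vals ++ [get x (h - 1 - y)] else vals
        let vals := if mode == "xy" then vals ++ [get (w - 1 - x) (h - 1 - y)] else vals
        if merge == "sum" then vals.sum else (PySem.List.max? vals (fun v => v)).getD 0))

-- ===== PORT B =====
-- pvZipN d ls ports Python's zip(*ls): columns up to the length of the shortest list (d is never reached)
def pvZipN {α : Type} (d : α) (ls : List (List α)) : List (List α) :=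
  let n := match ls with
    | [] => 0
    | a :: t => t.foldl (fun m l => min m l.length) a.length
  (List.range n).map (fun i => ls.map (fun l => l.getD i d))

-- variant fields then pointwise merge via zip (pvZipN)
def symmetrize_field_alt (field : List (List Int)) (mode : String) (merge : String) : List (List Int) :=
  if mode == "none" then field
  else
    let h := field.length
    let w := if h ≠ 0 then (field.headD []).length else 0
    let variants := [field.map (fun row => row.take w)]
    let variants := variants ++
      (if mode == "x" || mode == "xy" then
        [field.map (fun row => (List.range w).map (fun x => row.getD (w - 1 - x) 0))] else [])
    let variants := variants ++
      (if mode == "y" || mode == "xy" then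
        [(List.range h).map (fun y => (field.getD (h - 1 - y) []).take w)] else [])
    let variants := variants ++
      (if mode == "xy" then
        [(List.range h).map (fun y =>
          (List.range w).map (fun x => (field.getD (h - 1 - y) []).getD (w - 1 - x) 0))] else [])
    (pvZipN [] variants).map (fun rows =>
      (pvZipN 0 rows).map (fun cells =>
        if merge == "sum" then cells.sum else (PySem.List.max? cells (fun v => v)).getD 0))

-- ===== PRECONDITION & SPEC =====
-- Pre_ excludes only inputs where Python A raises IndexError: a row shorter than the first row (when mode ≠ "none")
def Pre_symmetrize_field (field : List (List Int)) (mode : String) (merge : String) : Prop :=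
  mode = "none" ∨ ∀ row ∈ field, (field.headD []).length ≤ row.length
instance (field : List (List Int)) (mode : String) (merge : String) : Decidable (Pre_symmetrize_field field mode merge) := by unfold Pre_symmetrize_field; infer_instance

def pvWitness_symmetrize_field : List (List Int) × String × String := ([[1, 2], [3, 4]], "xy", "sum")

def Spec_symmetrize_field (field : List (List Int)) (mode : String) (merge : String) (out : List (List Int)) : Prop := out = symmetrize_field_alt field mode merge
instance (field : List (List Int)) (mode : String) (merge : String) (out : List (List Int)) : Decidable (Spec_symmetrize_field field mode merge out) := by unfold Spec_symmetrize_field; infer_instance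

-- ===== CLAIM (what is proved, stated in full; the proofs are below) =====
def Claim_equal_symmetrize_field : Prop := ∀ (field : List (List Int)) (mode : String) (merge : String), Dom_symmetrize_field field mode merge → Pre_symmetrize_field field mode merge → Spec_symmetrize_field field mode merge (symmetrize_field field mode merge)

-- ===== LEMMAS AND PROOFS =====
theorem pv_foldl_min_len {α : Type} (n : Nat) (t : List (List α))
    (h : ∀ l ∈ t, l.length = n) : t.foldl (fun m l => min m l.length) n = n := by
  induction t with
  | nil => rfl
  | cons a t ih =>
    have ha := h a (by simp)
    simp only [List.foldl_cons, ha, min_self]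
    exact ih (fun l hl => h l (by simp [hl]))

theorem pvZipN_eq {α : Type} (d : α) (n : Nat) (ls : List (List α)) (hne : ls ≠ [])
    (hlen : ∀ l ∈ ls, l.length = n) :
    pvZipN d ls = (List.range n).map (fun i => ls.map (fun l => l.getD i d)) := by
  unfold pvZipN
  cases ls with
  | nil => exact absurd rfl hne
  | cons a t =>
    have ha : a.length = n := hlen a (by simp)
    have hf := pv_foldl_min_len (α := α) n t (fun l hl => hlen l (by simp [hl]))
    simp only [ha, hf]

theorem pv_mem_ite_singleton {α : Type} {c : Prop} [Decidable c] {v e : α}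
    (h : v ∈ if c then [e] else []) : v = e := by
  split at h <;> simp_all

theorem pv_map_getD (l : List (List Int)) (f : List Int → List Int) (y : Nat)
    (hy : y < l.length) : (l.map f).getD y [] = f (l.getD y []) := by
  simp [List.getD_eq_getElem?_getD, List.getElem?_eq_getElem (by simpa using hy)]

theorem pv_rangeMapL_getD (F : Nat → List Int) (h y : Nat) (hy : y < h) :
    ((List.range h).map F).getD y [] = F y := by
  simp [List.getD_eq_getElem?_getD, hy]

-- ===== VERDICT (by name: the statement is the Claim_ definition above) =====
set_option maxHeartbeats 2000000 in
theorem symmetrize_field_spec : Claim_equal_symmetrize_field := by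
  intro field mode merge _ hpre
  unfold Spec_symmetrize_field symmetrize_field symmetrize_field_alt
  by_cases hn : mode == "none"
  · simp [hn]
  · have hrow : ∀ row ∈ field, (field.headD []).length ≤ row.length := by
      rcases hpre with h | h
      · exact absurd (by simp [h]) hn
      · exact h
    simp only [hn, Bool.false_eq_true, if_false]
    by_cases hfe : field.length = 0
    · rw [List.length_eq_zero_iff] at hfe
      subst hfe
      split_ifs <;> simp [pvZipN]
    · simp only [ne_eq, hfe, not_false_eq_true, if_true]
      rw [pvZipN_eq [] field.length]
      · rw [List.map_map]
        apply List.map_congr_left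
        intro y hy
        rw [List.mem_range] at hy
        simp only [Function.comp]
        rw [pvZipN_eq 0 (field.headD []).length]
        · rw [List.map_map]
          apply List.map_congr_left
          intro x hx
          rw [List.mem_range] at hx
          simp only [Function.comp, List.map_map]
          simp only [List.headD_eq_head?_getD] at hx
          split_ifs <;>
            simp [hy, hx, List.getD_eq_getElem?_getD]
        · -- the row list for this y is nonempty (it starts with the base variant's row)
          simp
        · -- every variant's row y has length w
          intro r hr
          rw [List.mem_map] at hr
          obtain ⟨v, hv, rfl⟩ := hr
          simp only [List.mem_append] at hv
          have hw : ∀ i, i < field.length →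
              ((field.getD i []).take (field.headD []).length).length = (field.headD []).length := by
            intro i hi
            have hmem : field.getD i [] ∈ field := by
              have hg : field.getD i [] = field[i] := by
                simp [List.getD_eq_getElem?_getD, List.getElem?_eq_getElem hi]
              rw [hg]
              exact List.getElem_mem hi
            have := hrow _ hmem
            simp only [List.length_take]
            omega
          rcases hv with ((hv | hv) | hv) | hv
          · rw [List.mem_singleton] at hv
            subst hv
            rw [pv_map_getD _ _ _ hy]
            exact hw y hy
          · rw [pv_mem_ite_singleton hv, pv_map_getD _ _ _ hy]
            simp
          · rw [pv_mem_ite_singleton hv, pv_rangeMapL_getD _ _ _ hy]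
            exact hw _ (by omega)
          · rw [pv_mem_ite_singleton hv, pv_rangeMapL_getD _ _ _ hy]
            simp
      · -- the variants list is nonempty
        simp
      · -- every variant has height h
        intro v hv
        simp only [List.mem_append] at hv
        rcases hv with ((hv | hv) | hv) | hv
        · rw [List.mem_singleton] at hv; subst hv; simp
        · rw [pv_mem_ite_singleton hv]; simp
        · rw [pv_mem_ite_singleton hv]; simp
        · rw [pv_mem_ite_singleton hv]; simp
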